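-- pv_equiv track=rewrite | github.com/jforsyth/ENGR280-Python | step-count/data_utils.py | find_maxima_groups
-- ===== SOURCE A (Python) =====
-- def find_maxima_groups(maxima_array, spacing):
--     """
--     Finds groups of local maximas based on
--         spacing from one another.
--
--     Parameters:
--     maxima_array (list): List containing indicies of maximas
--     spacing (int): Maximum distance between points to still
--         be considered in a group
--
--     Returns:
--     list of lists: Indcies representing "groups" of maximas
--     """
--     groups = []
--     start = maxima_array[0]
--     end = maxima_array[0]
--     for i in range(0, len(maxima_array) - 1):
--         if maxima_array[i+1] - maxima_array[i] > spacing: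
--             end = maxima_array[i]
--             groups.append([start, end])
--             start = maxima_array[i + 1]
--         if i == len(maxima_array) - 2:
--             end = maxima_array[-1]
--             groups.append([start, end])
--
--     return groups
-- ===== SOURCE B (Python) =====
-- def find_maxima_groups(maxima_array, spacing):
--     """Divide-and-conquer: group each half recursively, then merge across the boundary."""
--     if len(maxima_array) < 2:
--         return []
--     return _dc_groups(maxima_array, spacing)
--
-- def _dc_groups(seg, spacing):
--     if len(seg) < 2:
--         return [[seg[0], seg[-1]]]
--     mid = len(seg) // 2
--     left = _dc_groups(seg[:mid], spacing)
--     right = _dc_groups(seg[mid:], spacing)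
--     if seg[mid] - seg[mid - 1] > spacing:
--         return left + right
--     return left[:-1] + [[left[-1][0], right[0][1]]] + right[1:]
-- ===== Notes on version B (the rewrite author's own statement) =====
-- stated objective: alternative
-- what changed: Replaces A's single left-to-right scan carrying (groups,start,end) state by a divide-and-conquer algorithm: recursively group each half of the array and merge the two results, fusing the last group of the left half with the first group of the right half when the boundary gap is within spacing.
import Mathlib
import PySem

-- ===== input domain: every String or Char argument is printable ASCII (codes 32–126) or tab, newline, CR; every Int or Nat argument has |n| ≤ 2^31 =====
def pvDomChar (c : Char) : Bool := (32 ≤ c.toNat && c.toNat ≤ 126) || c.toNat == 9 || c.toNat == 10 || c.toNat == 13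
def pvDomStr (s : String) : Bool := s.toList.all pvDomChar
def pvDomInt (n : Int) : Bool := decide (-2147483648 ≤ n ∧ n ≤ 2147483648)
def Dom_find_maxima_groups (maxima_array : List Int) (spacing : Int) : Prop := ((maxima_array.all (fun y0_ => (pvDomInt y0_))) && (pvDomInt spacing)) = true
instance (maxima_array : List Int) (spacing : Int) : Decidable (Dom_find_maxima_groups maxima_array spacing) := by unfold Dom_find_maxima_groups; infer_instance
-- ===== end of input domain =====

-- B replaces A's single left-to-right scan with (groups, start, end) state by a divide-and-conquer
-- algorithm: group each half recursively, then merge the two group lists across the boundary gap.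

-- ===== PORT A =====
-- loop body of A's single fused 'for i in range(0, len(maxima_array) - 1)'
def stepA (a : List Int) (spacing : Int) (s : List (List Int) × Int × Int) (i : Int) :
    List (List Int) × Int × Int :=
  let s' :=
    if PySem.List.pyGetD a (i + 1) 0 - PySem.List.pyGetD a i 0 > spacing then
      (s.1 ++ [[s.2.1, PySem.List.pyGetD a i 0]],
       PySem.List.pyGetD a (i + 1) 0, PySem.List.pyGetD a i 0)
    else s
  if i = (a.length : Int) - 2 then
    (s'.1 ++ [[s'.2.1, PySem.List.pyGetD a (-1) 0]], s'.2.1, PySem.List.pyGetD a (-1) 0)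
  else s'

def find_maxima_groups (maxima_array : List Int) (spacing : Int) : List (List Int) :=
  -- 'start = end = maxima_array[0]' raises IndexError on []: that input is excluded by Pre_
  let start := PySem.List.pyGetD maxima_array 0 0
  ((PySem.List.pyRange 0 ((maxima_array.length : Int) - 1) 1).foldl
      (stepA maxima_array spacing) ([], start, start)).1

-- ===== PORT B =====
-- B's recursive helper _dc_groups: split at the midpoint, group each half, merge at the boundary.
-- The len<2 base case is only ever reached on singletons (pyGetD's default on [] is never used).
def dcGroups (sp : Int) (seg : List Int) : List (List Int) :=
  if seg.length < 2 then
    [[PySem.List.pyGetD seg 0 0, PySem.List.pyGetD seg (-1) 0]]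
  else
    -- mid = len(seg) // 2 : exact, since seg.length ≥ 0 Nat division is Python's floor division
    let mid : Nat := seg.length / 2
    let left := dcGroups sp (PySem.List.slice seg none (some (mid : Int)))
    let right := dcGroups sp (PySem.List.slice seg (some (mid : Int)) none)
    if PySem.List.pyGetD seg (mid : Int) 0 - PySem.List.pyGetD seg ((mid : Int) - 1) 0 > sp then
      left ++ right
    else
      PySem.List.slice left none (some (-1)) ++
        [[PySem.List.pyGetD (PySem.List.pyGetD left (-1) []) 0 0,
          PySem.List.pyGetD (PySem.List.pyGetD right 0 []) 1 0]] ++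
        PySem.List.slice right (some 1) none
termination_by seg.length
decreasing_by
  · simp only [PySem.List.slice_to_natCast, List.length_take]
    omega
  · simp only [PySem.List.slice_from_natCast, List.length_drop]
    omega

def find_maxima_groups_alt (maxima_array : List Int) (spacing : Int) : List (List Int) :=
  if (maxima_array.length : Int) < 2 then [] else dcGroups spacing maxima_array

-- ===== PRECONDITION & SPEC =====
-- Pre_ excludes only the empty list, on which A raises IndexError (maxima_array[0]).
def Pre_find_maxima_groups (maxima_array : List Int) (spacing : Int) : Prop := maxima_array ≠ []
instance (maxima_array : List Int) (spacing : Int) : Decidable (Pre_find_maxima_groups maxima_array spacing) := by unfold Pre_find_maxima_groups; infer_instance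

def pvWitness_find_maxima_groups : List Int × Int := ([0, 3], 1)

def Spec_find_maxima_groups (maxima_array : List Int) (spacing : Int) (out : List (List Int)) : Prop := out = find_maxima_groups_alt maxima_array spacing
instance (maxima_array : List Int) (spacing : Int) (out : List (List Int)) : Decidable (Spec_find_maxima_groups maxima_array spacing out) := by unfold Spec_find_maxima_groups; infer_instance

-- ===== CLAIM (what is proved, stated in full; the proofs are below) =====
def Claim_equal_find_maxima_groups : Prop := ∀ (maxima_array : List Int) (spacing : Int), Dom_find_maxima_groups maxima_array spacing → Pre_find_maxima_groups maxima_array spacing → Spec_find_maxima_groups maxima_array spacing (find_maxima_groups maxima_array spacing)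

-- ===== LEMMAS AND PROOFS =====

-- common characterisation: the groups produced from current segment-start value `start`,
-- previous maximum `prev`, and remaining maxima
def segB (sp start prev : Int) : List Int → List (List Int)
  | [] => [[start, prev]]
  | y :: t => if y - prev > sp then [start, prev] :: segB sp y y t else segB sp start y t

-- the boundary merge of B's else-branch, written with the port's own total primitives
def fuse (gs hs : List (List Int)) : List (List Int) :=
  gs.dropLast ++
    [[PySem.List.pyGetD (PySem.List.pyGetD gs (-1) []) 0 0,
      PySem.List.pyGetD (PySem.List.pyGetD hs 0 []) 1 0]] ++ hs.tail

lemma drop_len {a t : List Int} {k : Nat} {prev : Int} (h : a.drop k = prev :: t) :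
    a.length = k + t.length + 1 := by
  have h2 := congrArg List.length h
  simp [List.length_drop] at h2
  omega

lemma getD_of_drop {a t : List Int} {k : Nat} {prev : Int} (h : a.drop k = prev :: t) :
    PySem.List.pyGetD a (k : Int) 0 = prev := by
  rw [PySem.List.pyGetD_natCast, List.getD_eq_getElem?_getD]
  have h1 : a[k]? = some prev := by
    have h0 := List.getElem?_drop (xs := a) (i := k) (j := 0)
    rw [h] at h0; simpa using h0.symm
  simp [h1]

lemma getLast_of_drop {a t : List Int} {k : Nat} {prev : Int} (h : a.drop k = prev :: t)
    (hlast : k + 1 = a.length) (hne : a ≠ []) : a.getLast hne = prev := by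
  have h1 : a[k]? = some prev := by
    have h0 := List.getElem?_drop (xs := a) (i := k) (j := 0)
    rw [h] at h0; simpa using h0.symm
  rw [List.getLast_eq_getElem, List.getElem_eq_iff]
  have hk : a.length - 1 = k := by omega
  rw [hk]; exact h1

lemma ne_nil_of_drop {a t : List Int} {k : Nat} {prev : Int} (h : a.drop k = prev :: t) :
    a ≠ [] := by
  intro h0; rw [h0] at h; simp at h

lemma getD_succ_of_drop {a t : List Int} {k : Nat} {y : Int}
    (h : a.drop (k + 1) = y :: t) : PySem.List.pyGetD a ((k : Int) + 1) 0 = y := by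
  have h1 := getD_of_drop h
  rwa [show ((k + 1 : Nat) : Int) = (k : Int) + 1 by push_cast; ring] at h1

-- A's fused loop, run from index k with the remaining maxima prev :: t (t ≠ []), produces segB
lemma loopA (a : List Int) (sp : Int) :
    ∀ (t : List Int) (k : Nat) (prev : Int) (gs : List (List Int)) (start e : Int),
      a.drop k = prev :: t → t ≠ [] →
        ((PySem.List.pyRange (k : Int) ((a.length : Int) - 1) 1).foldl (stepA a sp)
            (gs, start, e)).1 = gs ++ segB sp start prev t := by
  intro t
  induction t with
  | nil => intro _ _ _ _ _ _ hne; exact absurd rfl hne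
  | cons y t' ih =>
    intro k prev gs start e hdrop _
    have hlen := drop_len hdrop
    simp only [List.length_cons] at hlen
    have h2 : a.drop (k + 1) = y :: t' := by rw [← List.tail_drop, hdrop]; rfl
    have hky := getD_succ_of_drop h2
    have hkp := getD_of_drop hdrop
    have hne : a ≠ [] := ne_nil_of_drop hdrop
    rw [PySem.List.pyRange_one_cons (by omega), List.foldl_cons]
    cases t' with
    | nil =>
      have hlen2 : a.length = k + 2 := by simpa using hlen
      have hlastv : PySem.List.pyGetD a (-1) 0 = y := by
        rw [PySem.List.pyGetD_neg_one a 0 hne]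
        exact getLast_of_drop h2 (by omega) hne
      have hk2 : ((a.length : Int) - 2) = (k : Int) := by omega
      rw [PySem.List.pyRange_one_eq_nil (by omega), List.foldl_nil]
      by_cases hb : y - prev > sp <;>
        simp [stepA, hky, hkp, hk2, hlastv, hb, segB]
    | cons z t'' =>
      have hk2 : ¬ ((k : Int) = (a.length : Int) - 2) := by simp at hlen; omega
      have hstep : ∀ s : List (List Int) × Int × Int, stepA a sp s (k : Int) =
          if y - prev > sp then (s.1 ++ [[s.2.1, prev]], y, prev) else s := by
        intro s; simp [stepA, hky, hkp, hk2]
      rw [hstep]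
      have hcast : ((k : Int) + 1) = ((k + 1 : Nat) : Int) := by push_cast; ring
      by_cases hb : y - prev > sp
      · rw [if_pos hb, hcast, ih (k + 1) y (gs ++ [[start, prev]]) y prev h2 (by simp)]
        simp [segB, hb]
      · rw [if_neg hb, hcast, ih (k + 1) y gs start e h2 (by simp)]
        simp [segB, hb]

-- segB never produces the empty group list
lemma segB_ne_nil (sp : Int) : ∀ (t : List Int) (s p : Int), segB sp s p t ≠ [] := by
  intro t
  induction t with
  | nil => intro s p; simp [segB]
  | cons y t' ih =>
    intro s p
    simp only [segB]
    split
    · simp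
    · exact ih s y

-- the first group of segB is [start, e] with e and the remaining groups independent of start
lemma segB_first (sp : Int) : ∀ (t : List Int) (p : Int),
    ∃ e gs, ∀ s, segB sp s p t = [s, e] :: gs := by
  intro t
  induction t with
  | nil => intro p; exact ⟨p, [], fun s => rfl⟩
  | cons y t' ih =>
    intro p
    by_cases hb : y - p > sp
    · exact ⟨p, segB sp y y t', fun s => by simp [segB, hb]⟩
    · obtain ⟨e, gs, hgs⟩ := ih y
      exact ⟨e, gs, fun s => by simp [segB, hb, hgs s]⟩

lemma fuse_cons (x : List Int) (G H : List (List Int)) (hG : G ≠ []) :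
    fuse (x :: G) H = x :: fuse G H := by
  unfold fuse
  rw [List.dropLast_cons_of_ne_nil hG,
    PySem.List.pyGetD_neg_one _ _ (by simp), PySem.List.pyGetD_neg_one _ _ hG,
    List.getLast_cons hG]
  simp

-- splitting/merging lemma: segB on a concatenation is the two halves' segB merged at the boundary
lemma segB_append (sp : Int) : ∀ (t1 : List Int) (s p y : Int) (t2 : List Int),
    segB sp s p (t1 ++ y :: t2) =
      if y - (p :: t1).getLast (by simp) > sp
      then segB sp s p t1 ++ segB sp y y t2
      else fuse (segB sp s p t1) (segB sp y y t2) := by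
  intro t1
  induction t1 with
  | nil =>
    intro s p y t2
    obtain ⟨e, gs, hgs⟩ := segB_first sp t2 y
    by_cases hb : y - p > sp
    · simp [segB, hb, List.getLast]
    · simp only [List.nil_append, List.getLast_singleton, if_neg hb]
      rw [show segB sp s p (y :: t2) = segB sp s y t2 by simp [segB, hb], hgs s]
      unfold fuse
      rw [hgs y]
      simp only [segB]
      rw [PySem.List.pyGetD_neg_one _ _ (by simp), PySem.List.pyGetD_zero_cons]
      simp [PySem.List.pyGetD_zero_cons]
      norm_num [PySem.List.pyGetD, PySem.List.pyGet?, PySem.List.pyIdx?]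
  | cons z t1' ih =>
    intro s p y t2
    have hgl : (p :: z :: t1').getLast (by simp) = (z :: t1').getLast (by simp) :=
      List.getLast_cons (by simp)
    by_cases hb : z - p > sp
    · have h1 : segB sp s p ((z :: t1') ++ y :: t2) = [s, p] :: segB sp z z (t1' ++ y :: t2) := by
        simp [segB, hb]
      rw [h1, ih z z y t2, hgl]
      split
      · simp [segB, hb]
      · rw [show segB sp s p (z :: t1') = [s, p] :: segB sp z z t1' by simp [segB, hb]]
        rw [fuse_cons _ _ _ (segB_ne_nil sp t1' z z)]
    · have h1 : segB sp s p ((z :: t1') ++ y :: t2) = segB sp s z (t1' ++ y :: t2) := by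
        simp [segB, hb]
      rw [h1, ih s z y t2, hgl]
      rw [show segB sp s p (z :: t1') = segB sp s z t1' by simp [segB, hb]]

-- B's divide-and-conquer equals segB
lemma dc_eq_segB (sp : Int) : ∀ (n : Nat) (seg t : List Int) (s : Int),
    seg.length ≤ n → seg = s :: t → dcGroups sp seg = segB sp s s t := by
  intro n
  induction n with
  | zero => intro seg t s hle he; subst he; simp at hle
  | succ n ih =>
    intro seg t s hle he
    by_cases h2 : seg.length < 2
    · -- singleton: base case of both
      have ht : t = [] := by subst he; simp at h2; simpa using h2
      subst ht; subst he
      rw [dcGroups]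
      simp [segB, PySem.List.pyGetD, PySem.List.pyGet?_neg_one]
    · rw [dcGroups, if_neg h2]
      simp only []
      have hlen2 : 2 ≤ seg.length := by omega
      obtain ⟨m, hm⟩ : ∃ m, seg.length / 2 = m := ⟨_, rfl⟩
      rw [hm]
      have hm1 : 1 ≤ m := by omega
      have hmlt : m < seg.length := by omega
      -- the two slices
      have hsl : PySem.List.slice seg none (some (m : Int)) = seg.take m :=
        PySem.List.slice_to_natCast seg m
      have hsr : PySem.List.slice seg (some (m : Int)) none = seg.drop m :=
        PySem.List.slice_from_natCast seg m
      -- left half is s :: t.take (m-1), right half is t[m-1] :: t.drop m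
      obtain ⟨k, hk⟩ : ∃ k, m = k + 1 := ⟨m - 1, by omega⟩
      have hts : seg.take m = s :: t.take (m - 1) := by
        subst he; subst hk; simp
      have htlen : t.length = seg.length - 1 := by subst he; simp
      have hm1t : m - 1 < t.length := by omega
      have htd : t.drop (m - 1) = t[m - 1] :: t.drop m := by
        rw [List.drop_eq_getElem_cons hm1t]
        congr 2 <;> omega
      have hsegdrop : seg.drop m = t[m - 1] :: t.drop m := by
        subst he
        rw [show (s :: t).drop m = t.drop (m - 1) by subst hk; simp]
        exact htd
      -- the two recursive calls via the induction hypothesis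
      have hleft : dcGroups sp (PySem.List.slice seg none (some (m : Int)))
          = segB sp s s (t.take (m - 1)) := by
        rw [hsl]
        exact ih (seg.take m) (t.take (m - 1)) s (by simp [List.length_take]; omega) hts
      have hright : dcGroups sp (PySem.List.slice seg (some (m : Int)) none)
          = segB sp (t[m - 1]) (t[m - 1]) (t.drop m) := by
        rw [hsr]
        exact ih (seg.drop m) (t.drop m) (t[m - 1]) (by simp [List.length_drop]; omega) hsegdrop
      -- the two boundary elements
      have hgm : PySem.List.pyGetD seg (m : Int) 0 = t[m - 1] := getD_of_drop hsegdrop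
      have hgm1 : PySem.List.pyGetD seg ((m : Int) - 1) 0 = (s :: t.take (m - 1)).getLast (by simp) := by
        have hdm1 : seg.drop (m - 1) = (s :: t.take (m - 1)).getLast (by simp) :: seg.drop m := by
          have h0 : m - 1 < seg.length := by omega
          rw [List.drop_eq_getElem_cons h0]
          have hdd : List.drop (m - 1 + 1) seg = List.drop m seg := by
            congr 1 <;> omega
          have hhd : seg[m - 1]'h0 = (s :: List.take (m - 1) t).getLast (by simp) := by
            rw [List.getLast_eq_getElem]
            simp only [← hts, List.getElem_take, List.length_take]
            congr 1 <;> omega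
          rw [hdd, hhd]
        have := getD_of_drop hdm1
        rwa [show (((m : Nat) - 1 : Nat) : Int) = (m : Int) - 1 by omega] at this
      -- assemble: decompose t as take (m-1) ++ t[m-1] :: drop m and apply segB_append
      have htsplit : t = t.take (m - 1) ++ t[m - 1] :: t.drop m := by
        rw [← htd, List.take_append_drop]
      rw [hleft, hright, hgm, hgm1]
      conv_rhs => rw [htsplit]
      rw [segB_append sp (t.take (m - 1)) s s (t[m - 1]) (t.drop m)]
      split
      · rfl
      · -- else branch: the port's slice/pyGetD expression is exactly `fuse`
        unfold fuse
        rw [PySem.List.slice_to_neg_one, PySem.List.slice_from_one]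

-- ===== VERDICT (by name: the statement is the Claim_ definition above) =====
theorem find_maxima_groups_spec : Claim_equal_find_maxima_groups := by
  intro a sp _dom hpre
  unfold Spec_find_maxima_groups
  match a, hpre with
  | [x], _ =>
    simp [find_maxima_groups, find_maxima_groups_alt, PySem.List.pyRange_one_eq_nil]
  | x :: y :: t, _ =>
    have hd : (x :: y :: t).drop 0 = x :: (y :: t) := rfl
    have hA := loopA (x :: y :: t) sp (y :: t) 0 x []
      (PySem.List.pyGetD (x :: y :: t) 0 0) (PySem.List.pyGetD (x :: y :: t) 0 0) hd (by simp)
    simp only [Nat.cast_zero] at hA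
    have hB := dc_eq_segB sp (t.length + 2) (x :: y :: t) (y :: t) x (by simp) rfl
    simp only [find_maxima_groups, find_maxima_groups_alt]
    rw [if_neg (by simp only [List.length_cons]; push_cast; omega), hA, hB]
    simp [PySem.List.pyGetD]
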